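-- pv_equiv track=rewrite | github.com/abhinav-gautam/leetcode | Topicwise/Arrays/3745. Maximize Expression of Three Elements.py | maximizeExpressionOfThree
-- ===== SOURCE A (Python) =====
-- from typing import List
--
-- def maximizeExpressionOfThree(nums: List[int]) -> int:
--     ans = float("-inf")
--     n = len(nums)
--     for a in range(n):
--         for b in range(n):
--             for c in range(n):
--                 if a != b and b != c:
--                     value = nums[a] + nums[b] - nums[c]
--                     ans = max(ans, value)
--     return ans
-- ===== SOURCE B (Python) =====
-- from typing import List
--
-- def maximizeExpressionOfThree(nums: List[int]) -> int:
--     # One pass computes the top-2 maxima (with first argmax) and bottom-2 minima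
--     # (with first argmin); then for each b the best a != b and best c != b are
--     # read off directly. Requires len(nums) >= 2.
--     n = len(nums)
--     i1, v1, v2 = 0, nums[0], None
--     j1, m1, m2 = 0, nums[0], None
--     for i in range(1, n):
--         v = nums[i]
--         if v > v1:
--             i1, v1, v2 = i, v, v1
--         elif v2 is None or v > v2:
--             v2 = v
--         if v < m1:
--             j1, m1, m2 = i, v, m1
--         elif m2 is None or v < m2:
--             m2 = v
--     ans = None
--     for b in range(n):
--         hi = v2 if b == i1 else v1
--         lo = m2 if b == j1 else m1
--         val = hi + nums[b] - lo
--         if ans is None or val > ans: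
--             ans = val
--     return ans
-- ===== Notes on version B (the rewrite author's own statement) =====
-- stated objective: faster
-- what changed: Replaces A's O(n^3) triple loop by a single pass that records the top-2 maxima (with first argmax) and bottom-2 minima (with first argmin), then one loop over b combining best a != b and best c != b.
-- outside the precondition, e.g. on maximizeExpressionOfThree([5]): A returns -inf, B raises TypeError; on maximizeExpressionOfThree([]): A returns -inf, B raises IndexError
import Mathlib
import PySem

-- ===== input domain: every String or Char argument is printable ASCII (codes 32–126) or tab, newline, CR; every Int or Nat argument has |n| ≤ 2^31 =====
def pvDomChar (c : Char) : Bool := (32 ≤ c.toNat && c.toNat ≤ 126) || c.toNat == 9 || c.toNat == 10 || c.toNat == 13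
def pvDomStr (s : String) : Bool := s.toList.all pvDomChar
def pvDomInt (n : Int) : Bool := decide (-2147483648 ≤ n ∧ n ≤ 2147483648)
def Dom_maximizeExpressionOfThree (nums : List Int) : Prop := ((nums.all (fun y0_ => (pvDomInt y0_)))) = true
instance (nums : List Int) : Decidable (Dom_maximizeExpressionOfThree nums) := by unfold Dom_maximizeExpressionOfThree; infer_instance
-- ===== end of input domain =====

-- B replaces A's O(n^3) triple loop by one pass computing top-2 maxima / bottom-2 minima
-- with first argmax/argmin, then a single loop over b (asymptotically faster).

-- ===== PORT A =====
-- ans starts as float('-inf'): modelled as Option Int, none = -inf; max(ans, v) is omaxStepA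
def omaxStepA (o : Option Int) (v : Int) : Option Int :=
  some (match o with | none => v | some x => max x v)

def maximizeExpressionOfThree (nums : List Int) : Int :=
  let n : Int := nums.length
  let ans := (PySem.List.pyRange 0 n 1).foldl (fun ans a =>
    (PySem.List.pyRange 0 n 1).foldl (fun ans b =>
      (PySem.List.pyRange 0 n 1).foldl (fun ans c =>
        if a ≠ b ∧ b ≠ c then
          omaxStepA ans (PySem.List.pyGetD nums a 0 + PySem.List.pyGetD nums b 0
            - PySem.List.pyGetD nums c 0)
        else ans) ans) ans) (none : Option Int)
  -- A returns float('-inf') (not an int) exactly when ans is still none (n < 2): excluded by Pre_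
  ans.getD 0

-- ===== PORT B =====
-- B-side helpers: the two 'if/elif' updates of the single scan (state (idx, best, second))
def top2Step (i : Int) (v : Int) (s : Int × Int × Option Int) : Int × Int × Option Int :=
  match s with
  | (i1, v1, v2) =>
    if v > v1 then (i, v, some v1)
    else match v2 with
      | none => (i1, v1, some v)
      | some w => if v > w then (i1, v1, some v) else (i1, v1, some w)

def bot2Step (i : Int) (v : Int) (s : Int × Int × Option Int) : Int × Int × Option Int :=
  match s with
  | (j1, m1, m2) =>
    if v < m1 then (i, v, some m1)
    else match m2 with
      | none => (j1, m1, some v)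
      | some w => if v < w then (j1, m1, some v) else (j1, m1, some w)

-- scan state: (i1, v1, v2, j1, m1, m2); v2/m2 are None until a second element is seen
def scanStepB (nums : List Int) (s : Int × Int × Option Int × Int × Int × Option Int)
    (i : Int) : Int × Int × Option Int × Int × Int × Option Int :=
  match s with
  | (i1, v1, v2, j1, m1, m2) =>
    let v := PySem.List.pyGetD nums i 0
    let t := top2Step i v (i1, v1, v2)
    let u := bot2Step i v (j1, m1, m2)
    (t.1, t.2.1, t.2.2, u.1, u.2.1, u.2.2)

def maximizeExpressionOfThree_alt (nums : List Int) : Int :=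
  let n : Int := nums.length
  let x0 := PySem.List.pyGetD nums 0 0
  match (PySem.List.pyRange 1 n 1).foldl (scanStepB nums) (0, x0, none, 0, x0, none) with
  | (i1, v1, v2, j1, m1, m2) =>
    let ans := (PySem.List.pyRange 0 n 1).foldl (fun ans b =>
      -- hi/lo read None (getD 0) only when n < 2, which Pre_ excludes (Python: TypeError)
      let hi := if b = i1 then v2.getD 0 else v1
      let lo := if b = j1 then m2.getD 0 else m1
      let val := hi + PySem.List.pyGetD nums b 0 - lo
      match ans with
      | none => some val
      | some x => if val > x then some val else some x) (none : Option Int)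
    ans.getD 0

-- ===== PRECONDITION & SPEC =====
-- Pre_ excludes lists with fewer than two elements: there A returns float('-inf'), which is
-- not an int (and B raises); no integer answer exists since no valid (a,b,c) triple exists.
def Pre_maximizeExpressionOfThree (nums : List Int) : Prop := 2 ≤ nums.length
instance (nums : List Int) : Decidable (Pre_maximizeExpressionOfThree nums) := by
  unfold Pre_maximizeExpressionOfThree; infer_instance

def pvWitness_maximizeExpressionOfThree : List Int := [3, -1, 4]

def Spec_maximizeExpressionOfThree (nums : List Int) (out : Int) : Prop := out = maximizeExpressionOfThree_alt nums
instance (nums : List Int) (out : Int) : Decidable (Spec_maximizeExpressionOfThree nums out) := by unfold Spec_maximizeExpressionOfThree; infer_instance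

-- ===== CLAIM (what is proved, stated in full; the proofs are below) =====
def Claim_equal_maximizeExpressionOfThree : Prop := ∀ (nums : List Int), Dom_maximizeExpressionOfThree nums → Pre_maximizeExpressionOfThree nums → Spec_maximizeExpressionOfThree nums (maximizeExpressionOfThree nums)

-- ===== LEMMAS AND PROOFS =====


-- `f nums i` below abbreviates nothing: we always write PySem.List.pyGetD nums i 0 directly.

def omaxList (l : List Int) : Option Int := l.foldl omaxStepA none

lemma foldl_omaxStepA_some (l : List Int) (x : Int) :
    l.foldl omaxStepA (some x) = some (l.foldl max x) := by
  induction l generalizing x with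
  | nil => rfl
  | cons v t ih => simpa [omaxStepA] using ih (max x v)

lemma omaxList_cons (v : Int) (t : List Int) :
    omaxList (v :: t) = some (t.foldl max v) := by
  simp [omaxList, List.foldl_cons, foldl_omaxStepA_some, omaxStepA]

lemma omaxList_eq_some_iff (l : List Int) (x : Int) :
    omaxList l = some x ↔ x ∈ l ∧ ∀ y ∈ l, y ≤ x := by
  cases l with
  | nil => simp [omaxList]
  | cons v t =>
    rw [omaxList_cons]
    constructor
    · rintro h
      injection h with h
      subst h
      refine ⟨?_, ?_⟩
      · rcases PySem.List.foldl_max_mem t v with h | h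
        · rw [h]; exact List.mem_cons_self
        · exact List.mem_cons_of_mem _ h
      · intro y hy
        rcases List.mem_cons.mp hy with rfl | hy
        · exact (PySem.List.le_foldl_max t y).1
        · exact (PySem.List.le_foldl_max t v).2 y hy
    · rintro ⟨hmem, hb⟩
      have h1 : t.foldl max v ≤ x := by
        rcases PySem.List.foldl_max_mem t v with h | h
        · rw [h]; exact hb v List.mem_cons_self
        · exact hb _ (List.mem_cons_of_mem _ h)
      have h2 : x ≤ t.foldl max v := by
        rcases List.mem_cons.mp hmem with rfl | h
        · exact (PySem.List.le_foldl_max t x).1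
        · exact (PySem.List.le_foldl_max t v).2 x h
      exact congrArg some (le_antisymm h1 h2)

lemma foldl_ite_omax {α : Type} (p : α → Prop) [DecidablePred p] (g : α → Int)
    (l : List α) (o : Option Int) :
    l.foldl (fun o a => if p a then omaxStepA o (g a) else o) o
      = (l.flatMap (fun a => if p a then [g a] else [])).foldl omaxStepA o := by
  induction l generalizing o with
  | nil => rfl
  | cons a t ih =>
    simp only [List.foldl_cons, List.flatMap_cons, List.foldl_append]
    split_ifs <;> simp [ih]

lemma foldl_flat_omax {α : Type} (g : α → List Int) (l : List α) (o : Option Int) :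
    l.foldl (fun o a => (g a).foldl omaxStepA o) o = (l.flatMap g).foldl omaxStepA o := by
  induction l generalizing o with
  | nil => rfl
  | cons a t ih => simp [List.foldl_append, ih]

lemma foldl_map_omax (g : Int → Int) (l : List Int) (o : Option Int) :
    l.foldl (fun o b => omaxStepA o (g b)) o = (l.map g).foldl omaxStepA o := by
  induction l generalizing o with
  | nil => rfl
  | cons a t ih => simp [List.foldl_cons, ih]

-- the value list A's triple loop maximizes over
def tripleList (nums : List Int) : List Int :=
  (PySem.List.pyRange 0 nums.length 1).flatMap fun a =>
    (PySem.List.pyRange 0 nums.length 1).flatMap fun b =>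
      (PySem.List.pyRange 0 nums.length 1).flatMap fun c =>
        if a ≠ b ∧ b ≠ c then
          [PySem.List.pyGetD nums a 0 + PySem.List.pyGetD nums b 0 - PySem.List.pyGetD nums c 0]
        else []

lemma A_eq_omax (nums : List Int) :
    maximizeExpressionOfThree nums = (omaxList (tripleList nums)).getD 0 := by
  unfold maximizeExpressionOfThree tripleList omaxList
  simp only [foldl_ite_omax, foldl_flat_omax]

lemma mem_tripleList (nums : List Int) (x : Int) :
    x ∈ tripleList nums ↔ ∃ a b c : Int,
      (0 ≤ a ∧ a < nums.length) ∧ (0 ≤ b ∧ b < nums.length) ∧ (0 ≤ c ∧ c < nums.length) ∧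
      a ≠ b ∧ b ≠ c ∧
      x = PySem.List.pyGetD nums a 0 + PySem.List.pyGetD nums b 0 - PySem.List.pyGetD nums c 0 := by
  simp only [tripleList, List.mem_flatMap, PySem.List.mem_pyRange_one]
  constructor
  · rintro ⟨a, ha, b, hb, c, hc, hx⟩
    split_ifs at hx with hcond
    · simp only [List.mem_singleton] at hx
      exact ⟨a, b, c, ha, hb, hc, hcond.1, hcond.2, hx⟩
    · simp at hx
  · rintro ⟨a, b, c, ha, hb, hc, h1, h2, rfl⟩
    exact ⟨a, ha, b, hb, c, hc, by simp [h1, h2]⟩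

-- invariants of B's scan after the first k elements
def InvMax (nums : List Int) (k i1 v1 : Int) (v2 : Option Int) : Prop :=
  0 ≤ i1 ∧ i1 < k ∧ PySem.List.pyGetD nums i1 0 = v1 ∧
  (∀ i, 0 ≤ i → i < k → PySem.List.pyGetD nums i 0 ≤ v1) ∧
  (match v2 with
   | none => k = 1
   | some w => (∃ i, 0 ≤ i ∧ i < k ∧ i ≠ i1 ∧ PySem.List.pyGetD nums i 0 = w) ∧
       (∀ i, 0 ≤ i → i < k → i ≠ i1 → PySem.List.pyGetD nums i 0 ≤ w))

def InvMin (nums : List Int) (k j1 m1 : Int) (m2 : Option Int) : Prop :=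
  0 ≤ j1 ∧ j1 < k ∧ PySem.List.pyGetD nums j1 0 = m1 ∧
  (∀ i, 0 ≤ i → i < k → m1 ≤ PySem.List.pyGetD nums i 0) ∧
  (match m2 with
   | none => k = 1
   | some w => (∃ i, 0 ≤ i ∧ i < k ∧ i ≠ j1 ∧ PySem.List.pyGetD nums i 0 = w) ∧
       (∀ i, 0 ≤ i → i < k → i ≠ j1 → w ≤ PySem.List.pyGetD nums i 0))

lemma top2Step_inv (nums : List Int) (k i1 v1 : Int) (v2 : Option Int)
    (hinv : InvMax nums k i1 v1 v2) (hk : 1 ≤ k) :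
    InvMax nums (k + 1) (top2Step k (PySem.List.pyGetD nums k 0) (i1, v1, v2)).1
      (top2Step k (PySem.List.pyGetD nums k 0) (i1, v1, v2)).2.1
      (top2Step k (PySem.List.pyGetD nums k 0) (i1, v1, v2)).2.2 := by
  obtain ⟨h0, h1, h2, h3, h4⟩ := hinv
  set v := PySem.List.pyGetD nums k 0 with hv
  by_cases hgt : v > v1
  · simp only [top2Step, if_pos hgt]
    refine ⟨by omega, by omega, rfl, ?_, ⟨i1, h0, by omega, by omega, h2⟩, ?_⟩
    · intro i hi0 hik
      rcases eq_or_lt_of_le (by omega : i ≤ k) with rfl | hlt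
      · exact le_refl _
      · exact le_trans (h3 i hi0 (by omega)) (le_of_lt hgt)
    · intro i hi0 hik hne
      exact h3 i hi0 (by omega)
  · have hle : v ≤ v1 := not_lt.mp hgt
    cases v2 with
    | none =>
      simp only [top2Step, if_neg hgt]
      subst h4
      refine ⟨h0, by omega, h2, ?_, ⟨1, by omega, by omega, by omega, rfl⟩, ?_⟩
      · intro i hi0 hik
        rcases eq_or_lt_of_le (by omega : i ≤ 1) with rfl | hlt
        · exact hle
        · exact h3 i hi0 (by omega)
      · intro i hi0 hik hne
        have : i = 1 := by omega
        subst this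
        exact le_of_eq hv.symm
    | some w =>
      obtain ⟨⟨iw, hiw0, hiwk, hiwne, hiwv⟩, hwb⟩ := h4
      by_cases hgw : v > w
      · simp only [top2Step, if_neg hgt, if_pos hgw]
        refine ⟨h0, by omega, h2, ?_, ⟨k, by omega, by omega, by omega, rfl⟩, ?_⟩
        · intro i hi0 hik
          rcases eq_or_lt_of_le (by omega : i ≤ k) with rfl | hlt
          · exact hle
          · exact h3 i hi0 (by omega)
        · intro i hi0 hik hne
          rcases eq_or_lt_of_le (by omega : i ≤ k) with rfl | hlt
          · exact le_refl _
          · exact le_trans (hwb i hi0 (by omega) hne) (le_of_lt hgw)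
      · simp only [top2Step, if_neg hgt, if_neg hgw]
        refine ⟨h0, by omega, h2, ?_, ⟨iw, hiw0, by omega, hiwne, hiwv⟩, ?_⟩
        · intro i hi0 hik
          rcases eq_or_lt_of_le (by omega : i ≤ k) with rfl | hlt
          · exact hle
          · exact h3 i hi0 (by omega)
        · intro i hi0 hik hne
          rcases eq_or_lt_of_le (by omega : i ≤ k) with rfl | hlt
          · exact not_lt.mp hgw
          · exact hwb i hi0 (by omega) hne

lemma bot2Step_inv (nums : List Int) (k j1 m1 : Int) (m2 : Option Int)
    (hinv : InvMin nums k j1 m1 m2) (hk : 1 ≤ k) :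
    InvMin nums (k + 1) (bot2Step k (PySem.List.pyGetD nums k 0) (j1, m1, m2)).1
      (bot2Step k (PySem.List.pyGetD nums k 0) (j1, m1, m2)).2.1
      (bot2Step k (PySem.List.pyGetD nums k 0) (j1, m1, m2)).2.2 := by
  obtain ⟨h0, h1, h2, h3, h4⟩ := hinv
  set v := PySem.List.pyGetD nums k 0 with hv
  by_cases hlt : v < m1
  · simp only [bot2Step, if_pos hlt]
    refine ⟨by omega, by omega, rfl, ?_, ⟨j1, h0, by omega, by omega, h2⟩, ?_⟩
    · intro i hi0 hik
      rcases eq_or_lt_of_le (by omega : i ≤ k) with rfl | h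
      · exact le_refl _
      · exact le_trans (le_of_lt hlt) (h3 i hi0 (by omega))
    · intro i hi0 hik hne
      exact h3 i hi0 (by omega)
  · have hge : m1 ≤ v := not_lt.mp hlt
    cases m2 with
    | none =>
      simp only [bot2Step, if_neg hlt]
      subst h4
      refine ⟨h0, by omega, h2, ?_, ⟨1, by omega, by omega, by omega, rfl⟩, ?_⟩
      · intro i hi0 hik
        rcases eq_or_lt_of_le (by omega : i ≤ 1) with rfl | h
        · exact hge
        · exact h3 i hi0 (by omega)
      · intro i hi0 hik hne
        have : i = 1 := by omega
        subst this
        exact le_of_eq hv.symm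
    | some w =>
      obtain ⟨⟨iw, hiw0, hiwk, hiwne, hiwv⟩, hwb⟩ := h4
      by_cases hgw : v < w
      · simp only [bot2Step, if_neg hlt, if_pos hgw]
        refine ⟨h0, by omega, h2, ?_, ⟨k, by omega, by omega, by omega, rfl⟩, ?_⟩
        · intro i hi0 hik
          rcases eq_or_lt_of_le (by omega : i ≤ k) with rfl | h
          · exact hge
          · exact h3 i hi0 (by omega)
        · intro i hi0 hik hne
          rcases eq_or_lt_of_le (by omega : i ≤ k) with rfl | h
          · exact le_refl _
          · exact le_trans (le_of_lt hgw) (hwb i hi0 (by omega) hne)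
      · simp only [bot2Step, if_neg hlt, if_neg hgw]
        refine ⟨h0, by omega, h2, ?_, ⟨iw, hiw0, by omega, hiwne, hiwv⟩, ?_⟩
        · intro i hi0 hik
          rcases eq_or_lt_of_le (by omega : i ≤ k) with rfl | h
          · exact hge
          · exact h3 i hi0 (by omega)
        · intro i hi0 hik hne
          rcases eq_or_lt_of_le (by omega : i ≤ k) with rfl | h
          · exact not_lt.mp hgw
          · exact hwb i hi0 (by omega) hne

lemma scan_inv (nums : List Int) (k : Int) (hk : 1 ≤ k) :
    InvMax nums k
      ((PySem.List.pyRange 1 k 1).foldl (scanStepB nums)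
        (0, PySem.List.pyGetD nums 0 0, none, 0, PySem.List.pyGetD nums 0 0, none)).1
      ((PySem.List.pyRange 1 k 1).foldl (scanStepB nums)
        (0, PySem.List.pyGetD nums 0 0, none, 0, PySem.List.pyGetD nums 0 0, none)).2.1
      ((PySem.List.pyRange 1 k 1).foldl (scanStepB nums)
        (0, PySem.List.pyGetD nums 0 0, none, 0, PySem.List.pyGetD nums 0 0, none)).2.2.1 ∧
    InvMin nums k
      ((PySem.List.pyRange 1 k 1).foldl (scanStepB nums)
        (0, PySem.List.pyGetD nums 0 0, none, 0, PySem.List.pyGetD nums 0 0, none)).2.2.2.1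
      ((PySem.List.pyRange 1 k 1).foldl (scanStepB nums)
        (0, PySem.List.pyGetD nums 0 0, none, 0, PySem.List.pyGetD nums 0 0, none)).2.2.2.2.1
      ((PySem.List.pyRange 1 k 1).foldl (scanStepB nums)
        (0, PySem.List.pyGetD nums 0 0, none, 0, PySem.List.pyGetD nums 0 0, none)).2.2.2.2.2 := by
  induction k, hk using Int.le_induction with
  | base =>
    rw [PySem.List.pyRange_one_eq_nil (le_refl 1)]
    simp only [List.foldl_nil]
    exact ⟨⟨le_refl 0, by omega, rfl, fun i h0 h1 => le_of_eq (by rw [show i = 0 from by omega]), rfl⟩,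
           ⟨le_refl 0, by omega, rfl, fun i h0 h1 => le_of_eq (by rw [show i = 0 from by omega]), rfl⟩⟩
  | succ k hk ih =>
    rw [PySem.List.pyRange_one_succ_right (by omega : 1 ≤ k), List.foldl_append, List.foldl_cons,
      List.foldl_nil]
    obtain ⟨ihmax, ihmin⟩ := ih
    set st := (PySem.List.pyRange 1 k 1).foldl (scanStepB nums)
      (0, PySem.List.pyGetD nums 0 0, none, 0, PySem.List.pyGetD nums 0 0, none) with hst
    obtain ⟨i1, v1, v2, j1, m1, m2⟩ := st
    have hmax := top2Step_inv nums k i1 v1 v2 ihmax hk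
    have hmin := bot2Step_inv nums k j1 m1 m2 ihmin hk
    simp only [scanStepB]
    exact ⟨hmax, hmin⟩


lemma foldl_stepB_eq (g : Int → Int) (l : List Int) (o : Option Int) :
    l.foldl (fun ans b =>
      match ans with
      | none => some (g b)
      | some x => if g b > x then some (g b) else some x) o
    = (l.map g).foldl omaxStepA o := by
  have hfun : (fun (ans : Option Int) (b : Int) =>
      match ans with
      | none => some (g b)
      | some x => if g b > x then some (g b) else some x)
      = fun ans b => omaxStepA ans (g b) := by
    funext ans b
    cases ans with
    | none => rfl
    | some x =>
      simp only [omaxStepA]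
      split_ifs with h
      · rw [max_eq_right (le_of_lt h)]
      · rw [max_eq_left (not_lt.mp h)]
  rw [hfun, foldl_map_omax]

-- ===== VERDICT (by name: the statement is the Claim_ definition above) =====
theorem maximizeExpressionOfThree_spec : Claim_equal_maximizeExpressionOfThree := by
  intro nums _ hpre
  unfold Spec_maximizeExpressionOfThree
  have hn2 : (2 : Int) ≤ (nums.length : Int) := by exact_mod_cast hpre
  rw [A_eq_omax]
  have hinv := scan_inv nums (nums.length : Int) (by omega)
  simp only [maximizeExpressionOfThree_alt]
  set st := (PySem.List.pyRange 1 (nums.length : Int) 1).foldl (scanStepB nums)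
      (0, PySem.List.pyGetD nums 0 0, none, 0, PySem.List.pyGetD nums 0 0, none) with hst
  obtain ⟨i1, v1, v2, j1, m1, m2⟩ := st
  obtain ⟨hmax, hmin⟩ := hinv
  obtain ⟨hi0, hi1, hi2, hi3, hi4⟩ := hmax
  obtain ⟨hj0, hj1, hj2, hj3, hj4⟩ := hmin
  cases v2 with
  | none => exact absurd (show ((nums.length : Int)) = 1 from hi4) (by omega)
  | some w2 =>
  cases m2 with
  | none => exact absurd (show ((nums.length : Int)) = 1 from hj4) (by omega)
  | some u2 =>
  obtain ⟨⟨iw, hiw0, hiwn, hiwne, hiwv⟩, hw2b⟩ := hi4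
  obtain ⟨⟨jw, hjw0, hjwn, hjwne, hjwv⟩, hu2b⟩ := hj4
  rw [foldl_stepB_eq (fun b => (if b = i1 then (some w2).getD 0 else v1)
      + PySem.List.pyGetD nums b 0 - (if b = j1 then (some u2).getD 0 else m1))]
  simp only [Option.getD_some]
  set g : Int → Int := fun b => (if b = i1 then w2 else v1)
      + PySem.List.pyGetD nums b 0 - (if b = j1 then u2 else m1) with hg
  -- existence and bound facts for the per-b max-excluding and min-excluding values
  have hiEx : ∀ b, ∃ a, 0 ≤ a ∧ a < (nums.length : Int) ∧ a ≠ b ∧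
      PySem.List.pyGetD nums a 0 = (if b = i1 then w2 else v1) := by
    intro b
    by_cases h : b = i1
    · rw [if_pos h]
      exact ⟨iw, hiw0, hiwn, by rw [h]; exact hiwne, hiwv⟩
    · rw [if_neg h]
      exact ⟨i1, hi0, hi1, fun he => h he.symm, hi2⟩
  have hiBd : ∀ b a, 0 ≤ a → a < (nums.length : Int) → a ≠ b →
      PySem.List.pyGetD nums a 0 ≤ (if b = i1 then w2 else v1) := by
    intro b a ha0 han hab
    by_cases h : b = i1
    · rw [if_pos h]
      exact hw2b a ha0 han (by rw [← h]; exact hab)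
    · rw [if_neg h]
      exact hi3 a ha0 han
  have hjEx : ∀ b, ∃ c, 0 ≤ c ∧ c < (nums.length : Int) ∧ c ≠ b ∧
      PySem.List.pyGetD nums c 0 = (if b = j1 then u2 else m1) := by
    intro b
    by_cases h : b = j1
    · rw [if_pos h]
      exact ⟨jw, hjw0, hjwn, by rw [h]; exact hjwne, hjwv⟩
    · rw [if_neg h]
      exact ⟨j1, hj0, hj1, fun he => h he.symm, hj2⟩
  have hjBd : ∀ b c, 0 ≤ c → c < (nums.length : Int) → c ≠ b →
      (if b = j1 then u2 else m1) ≤ PySem.List.pyGetD nums c 0 := by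
    intro b c hc0 hcn hcb
    by_cases h : b = j1
    · rw [if_pos h]
      exact hu2b c hc0 hcn (by rw [← h]; exact hcb)
    · rw [if_neg h]
      exact hj3 c hc0 hcn
  -- the B-side maximum MB
  have hex : ∃ MB, omaxList ((PySem.List.pyRange 0 (nums.length : Int) 1).map g) = some MB := by
    rw [PySem.List.pyRange_one_cons (by omega : (0 : Int) < (nums.length : Int))]
    rw [List.map_cons, omaxList_cons]
    exact ⟨_, rfl⟩
  obtain ⟨MB, hMB⟩ := hex
  have hRHS : ((PySem.List.pyRange 0 (nums.length : Int) 1).map g).foldl omaxStepA none = some MB := hMB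
  rw [hRHS]
  obtain ⟨hmem, hbd⟩ := (omaxList_eq_some_iff _ _).mp hMB
  obtain ⟨b, hbR, hgb⟩ := List.mem_map.mp hmem
  obtain ⟨hb0, hbn⟩ := PySem.List.mem_pyRange_one.mp hbR
  -- A's maximum equals MB
  have hA : omaxList (tripleList nums) = some MB := by
    apply (omaxList_eq_some_iff _ _).mpr
    constructor
    · obtain ⟨a, ha0, han, hab, hav⟩ := hiEx b
      obtain ⟨c, hc0, hcn, hcb, hcv⟩ := hjEx b
      apply (mem_tripleList nums MB).mpr
      refine ⟨a, b, c, ⟨ha0, han⟩, ⟨hb0, hbn⟩, ⟨hc0, hcn⟩, hab, fun he => hcb he.symm, ?_⟩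
      rw [hav, hcv, ← hgb]
    · intro y hy
      obtain ⟨a, b', c, ⟨ha0, han⟩, ⟨hb'0, hb'n⟩, ⟨hc0, hcn⟩, hab, hbc, rfl⟩ :=
        (mem_tripleList nums y).mp hy
      have h1 : PySem.List.pyGetD nums a 0 ≤ (if b' = i1 then w2 else v1) :=
        hiBd b' a ha0 han hab
      have h2 : (if b' = j1 then u2 else m1) ≤ PySem.List.pyGetD nums c 0 :=
        hjBd b' c hc0 hcn (fun he => hbc he.symm)
      have h3 : g b' ≤ MB :=
        hbd (g b') (List.mem_map_of_mem (PySem.List.mem_pyRange_one.mpr ⟨hb'0, hb'n⟩))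
      rw [hg] at h3
      simp only at h3
      omega
  rw [hA]
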